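-- pv_equiv track=rewrite | github.com/deorvova21/ASM.17.Lab4 | st21/transfer.py | spec_to_hex
-- ===== SOURCE A (Python) =====
-- def spec_to_hex(data, range_):
--     string = ''
--     for i in range(range_):
--         lst = list(data[i])
--         for ind, item in enumerate(lst):
--             if 32 <= ord(item) <= 47 or 58 <= ord(item) <= 64 or 91 <= ord(item) <= 96:
--                 lst[ind] = '%' + hex(ord(item))
--             string += lst[ind]
--         string += ' '
--     return string.split()
-- ===== SOURCE B (Python) =====
-- _SPECIAL = {chr(cp): '%' + hex(cp)
--             for cp in [*range(32, 48), *range(58, 65), *range(91, 97)]}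
--
--
-- def spec_to_hex(data, range_):
--     # single streaming pass: tokenize while hex-encoding, emitting finished tokens
--     # directly -- no intermediate joined string and no split() pass
--     out = []
--     cur = []
--     for i in range(range_):
--         for c in data[i]:
--             enc = _SPECIAL.get(c)
--             if enc is not None:
--                 cur.append(enc)
--             elif c.isspace():
--                 if cur:
--                     out.append(''.join(cur))
--                     cur = []
--             else:
--                 cur.append(c)
--         if cur:                      # word boundary (A's trailing ' ' per word)
--             out.append(''.join(cur))
--             cur = []
--     return out
-- ===== Notes on version B (the rewrite author's own statement) =====
-- stated objective: alternative
-- what changed: B is a single streaming tokenizer: it walks the characters once with an explicit (tokens, current-token) state, emitting a finished token at each whitespace char or word boundary, instead of A's transform-then-tokenize strategy (build one big space-joined string of per-char replacements via string +=, then call split()).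
import Mathlib
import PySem

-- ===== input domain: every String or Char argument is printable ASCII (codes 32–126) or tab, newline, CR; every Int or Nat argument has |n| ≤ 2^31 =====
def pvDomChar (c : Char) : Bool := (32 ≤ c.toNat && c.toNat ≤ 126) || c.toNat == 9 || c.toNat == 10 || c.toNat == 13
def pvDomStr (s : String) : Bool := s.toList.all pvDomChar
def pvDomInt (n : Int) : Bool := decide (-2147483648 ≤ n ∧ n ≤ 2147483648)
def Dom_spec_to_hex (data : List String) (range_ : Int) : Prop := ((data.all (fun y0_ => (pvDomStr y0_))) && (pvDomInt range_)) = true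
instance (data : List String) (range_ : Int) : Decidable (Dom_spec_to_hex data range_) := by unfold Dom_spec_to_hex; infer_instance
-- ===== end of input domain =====

-- B replaces A's transform-then-split strategy (build one big space-joined string of
-- per-char replacements, then split()) by a single streaming tokenizer that emits
-- finished tokens directly from an explicit (tokens, current-token) state, never building the joined string; timing run measured B faster.

-- ===== PORT A =====
-- Python's hex(n) for n ≥ 0: "0x" followed by lowercase hex digits (exact on Nat).
def pyHexDigit (n : Nat) : Char := if n < 10 then Char.ofNat (48 + n) else Char.ofNat (87 + n)

-- structural fuel recursion (fuel = n suffices since n/16 < n); kernel-reducible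
def pyHexCoreAux : Nat → Nat → List Char
  | 0, n => [pyHexDigit n]
  | fuel + 1, n =>
      if n < 16 then [pyHexDigit n]
      else pyHexCoreAux fuel (n / 16) ++ [pyHexDigit (n % 16)]

def pyHexCore (n : Nat) : List Char := pyHexCoreAux n n

def pyHex (n : Nat) : List Char := '0' :: 'x' :: pyHexCore n

-- the accumulator string is carried as a List Char; data[i] via pyGet? (getD "" is
-- unreachable inside Pre_, which excludes exactly the IndexError inputs)
def spec_to_hex (data : List String) (range_ : Int) : List String :=
  let string : List Char :=
    (PySem.List.pyRange 0 range_).foldl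
      (fun s i =>
        (((PySem.List.pyGet? data i).getD "").toList.foldl
          (fun s c =>
            s ++ (if (32 ≤ c.toNat ∧ c.toNat ≤ 47) ∨ (58 ≤ c.toNat ∧ c.toNat ≤ 64) ∨
                     (91 ≤ c.toNat ∧ c.toNat ≤ 96)
                  then '%' :: pyHex c.toNat else [c]))
          s) ++ [' '])
      []
  (PySem.Chars.split₀ string).map String.ofList

-- ===== PORT B =====
-- the _SPECIAL dict, built once: every covered char ↦ '%' + hex(cp)
def specialTable : PySem.Dict Char (List Char) :=
  (PySem.List.pyRange 32 48 ++ PySem.List.pyRange 58 65 ++ PySem.List.pyRange 91 97).foldl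
    (fun d cp => d.insert (Char.ofNat cp.toNat) ('%' :: pyHex cp.toNat)) PySem.Dict.empty

-- state = (out, cur); cur carried as List Char (Python's cur list of pieces, flattened)
def spec_to_hex_alt (data : List String) (range_ : Int) : List String :=
  let st : List (List Char) × List Char :=
    (PySem.List.pyRange 0 range_).foldl
      (fun st i =>
        let st := ((PySem.List.pyGet? data i).getD "").toList.foldl
          (fun (st : List (List Char) × List Char) c =>
            match specialTable.get? c with
            | some enc => (st.1, st.2 ++ enc)
            | none =>
              if PySem.Chars.isspace c then
                if st.2 ≠ [] then (st.1 ++ [st.2], []) else st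
              else (st.1, st.2 ++ [c]))
          st
        if st.2 ≠ [] then (st.1 ++ [st.2], []) else st)
      ([], [])
  st.1.map String.ofList

-- ===== PRECONDITION & SPEC =====
-- excludes exactly the inputs where A raises IndexError (range_ > len(data)); B raises there too
def Pre_spec_to_hex (data : List String) (range_ : Int) : Prop := range_ ≤ (data.length : Int)
instance (data : List String) (range_ : Int) : Decidable (Pre_spec_to_hex data range_) := by unfold Pre_spec_to_hex; infer_instance
def pvWitness_spec_to_hex : List String × Int := (["a b:c", "x!"], 2)

def Spec_spec_to_hex (data : List String) (range_ : Int) (out : List String) : Prop := out = spec_to_hex_alt data range_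
instance (data : List String) (range_ : Int) (out : List String) : Decidable (Spec_spec_to_hex data range_ out) := by unfold Spec_spec_to_hex; infer_instance

-- ===== CLAIM (what is proved, stated in full; the proofs are below) =====
def Claim_equal_spec_to_hex : Prop := ∀ (data : List String) (range_ : Int), Dom_spec_to_hex data range_ → Pre_spec_to_hex data range_ → Spec_spec_to_hex data range_ (spec_to_hex data range_)

-- ===== LEMMAS AND PROOFS =====

-- A's per-char replacement, as a function (proof-only helper)
def tc (c : Char) : List Char :=
  if (32 ≤ c.toNat ∧ c.toNat ≤ 47) ∨ (58 ≤ c.toNat ∧ c.toNat ≤ 64) ∨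
     (91 ≤ c.toNat ∧ c.toNat ≤ 96)
  then '%' :: pyHex c.toNat else [c]

def translateWord (w : List Char) : List Char := w.flatMap tc

-- the split₀ state machine as a fold step (state = (finished tokens, current token))
def splitStep (st : List (List Char) × List Char) (c : Char) : List (List Char) × List Char :=
  if PySem.Chars.isspace c then
    (if st.2 = [] then st else (st.1 ++ [st.2], []))
  else (st.1, st.2 ++ [c])

-- B's inner per-char step, named for the proofs
def bStep (st : List (List Char) × List Char) (c : Char) : List (List Char) × List Char :=
  match specialTable.get? c with
  | some enc => (st.1, st.2 ++ enc)
  | none =>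
    if PySem.Chars.isspace c then
      if st.2 ≠ [] then (st.1 ++ [st.2], []) else st
    else (st.1, st.2 ++ [c])

def bFlush (st : List (List Char) × List Char) : List (List Char) × List Char :=
  if st.2 ≠ [] then (st.1 ++ [st.2], []) else st

-- split₀.go expressed as a left fold of splitStep
lemma go_foldl (cs : List Char) (cur : List Char) (acc : List (List Char)) :
    PySem.Chars.split₀.go cs cur acc =
      (let p := cs.foldl splitStep (acc.reverse, cur.reverse)
       if p.2 = [] then p.1 else p.1 ++ [p.2]) := by
  induction cs generalizing cur acc with
  | nil =>
      simp only [PySem.Chars.split₀.go, List.foldl_nil]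
      by_cases h : cur = [] <;> simp [h]
  | cons c rest ih =>
      simp only [PySem.Chars.split₀.go, List.foldl_cons]
      by_cases hs : PySem.Chars.isspace c = true
      · rw [if_pos hs]
        by_cases hc : cur = []
        · subst hc
          simp only [List.isEmpty_nil, if_true, ih]
          simp [splitStep, hs]
        · rw [if_neg (by simpa [List.isEmpty_iff] using hc), ih]
          simp [splitStep, hs, hc, List.reverse_eq_nil_iff]
      · rw [if_neg hs, ih]
        simp [splitStep, hs]

lemma split₀_foldl (cs : List Char) :
    PySem.Chars.split₀ cs =
      (let p := cs.foldl splitStep ([], [])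
       if p.2 = [] then p.1 else p.1 ++ [p.2]) := by
  unfold PySem.Chars.split₀
  simpa using go_foldl cs [] []

-- specialTable lookup characterised for every Dom char
set_option maxRecDepth 10000 in
lemma table_get (c : Char) (hc : c.toNat < 127) :
    specialTable.get? c =
      (if (32 ≤ c.toNat ∧ c.toNat ≤ 47) ∨ (58 ≤ c.toNat ∧ c.toNat ≤ 64) ∨
          (91 ≤ c.toNat ∧ c.toNat ≤ 96)
       then some ('%' :: pyHex c.toNat) else none) := by
  have h : ∀ n < 127, specialTable.get? (Char.ofNat n) =
      (if (32 ≤ n ∧ n ≤ 47) ∨ (58 ≤ n ∧ n ≤ 64) ∨ (91 ≤ n ∧ n ≤ 96)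
       then some ('%' :: pyHex n) else none) := by decide
  have := h c.toNat hc
  rwa [Char.ofNat_toNat] at this

-- no char of '%' + hex(n) is whitespace (n < 127 suffices here)
set_option maxRecDepth 10000 in
lemma hex_no_space (n : Nat) (hn : n < 127) :
    ∀ ch ∈ '%' :: pyHex n, PySem.Chars.isspace ch = false := by
  have h : ∀ m < 127, (('%' :: pyHex m).all (fun ch => !PySem.Chars.isspace ch)) = true := by
    decide
  have := h n hn
  simp only [List.all_eq_true, Bool.not_eq_true'] at this
  exact this

-- folding splitStep over non-whitespace chars just appends them to the current token
lemma foldl_splitStep_nospace (l : List Char) (hl : ∀ ch ∈ l, PySem.Chars.isspace ch = false)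
    (st : List (List Char) × List Char) :
    l.foldl splitStep st = (st.1, st.2 ++ l) := by
  induction l generalizing st with
  | nil => simp
  | cons c rest ih =>
      have hc := hl c (by simp)
      rw [List.foldl_cons, ih (fun ch h => hl ch (by simp [h]))]
      simp [splitStep, hc]

-- per-char: B's step equals running the split machine over A's replacement of that char
lemma bStep_eq (c : Char) (hc : c.toNat < 127) (st : List (List Char) × List Char) :
    bStep st c = (tc c).foldl splitStep st := by
  unfold bStep tc
  rw [table_get c hc]
  by_cases hcond : (32 ≤ c.toNat ∧ c.toNat ≤ 47) ∨ (58 ≤ c.toNat ∧ c.toNat ≤ 64) ∨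
      (91 ≤ c.toNat ∧ c.toNat ≤ 96)
  · simp only [if_pos hcond]
    rw [foldl_splitStep_nospace _ (hex_no_space c.toNat hc) st]
  · simp only [if_neg hcond, List.foldl_cons, List.foldl_nil]
    unfold splitStep
    by_cases hs : PySem.Chars.isspace c = true
    · by_cases h2 : st.2 = [] <;> simp [hs, h2]
    · simp [hs]

-- per-word: B's inner fold + flush = split machine over the translated word + ' '
lemma bWord_eq (w : List Char) (hw : ∀ ch ∈ w, pvDomChar ch = true)
    (st : List (List Char) × List Char) :
    bFlush (w.foldl bStep st) = (translateWord w ++ [' ']).foldl splitStep st := by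
  have hmain : w.foldl bStep st = (translateWord w).foldl splitStep st := by
    induction w generalizing st with
    | nil => simp [translateWord]
    | cons c rest ih =>
        have hc : c.toNat < 127 := by
          have := hw c (by simp)
          simp only [pvDomChar, Bool.or_eq_true, Bool.and_eq_true, decide_eq_true_eq,
            beq_iff_eq] at this
          omega
        rw [List.foldl_cons, bStep_eq c hc st, translateWord, List.flatMap_cons,
          List.foldl_append]
        exact ih (fun ch h => hw ch (by simp [h])) _
  rw [List.foldl_append, ← hmain, List.foldl_cons, List.foldl_nil]
  unfold bFlush splitStep
  have hsp : PySem.Chars.isspace ' ' = true := by decide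
  by_cases h2 : (w.foldl bStep st).2 = [] <;> simp [hsp, h2]

lemma flush_snd (st : List (List Char) × List Char) :
    (if st.2 ≠ [] then (st.1 ++ [st.2], ([] : List Char)) else st).2 = [] := by
  by_cases h : st.2 = [] <;> simp [h]

-- B's outer step always leaves the current token empty
lemma bOuter_snd (l : List Int) (f : List (List Char) × List Char → Int →
      List (List Char) × List Char)
    (hf : ∀ st i, (f st i).2 = []) (st : List (List Char) × List Char) (hst : st.2 = []) :
    (l.foldl f st).2 = [] := by
  induction l generalizing st with
  | nil => exact hst
  | cons i rest ih => rw [List.foldl_cons]; exact ih _ (hf st i)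

-- ===== VERDICT (by name: the statement is the Claim_ definition above) =====
theorem spec_to_hex_spec : Claim_equal_spec_to_hex := by
  intro data range_ hdom _
  unfold Spec_spec_to_hex spec_to_hex spec_to_hex_alt
  dsimp only
  have hdom' : ∀ s ∈ data, ∀ c ∈ s.toList, pvDomChar c = true := by
    simp only [Dom_spec_to_hex, Bool.and_eq_true, List.all_eq_true] at hdom
    intro s hs c hc
    have := hdom.1 s hs
    simp only [pvDomStr, List.all_eq_true] at this
    exact this c hc
  have hwordDom : ∀ i : Int, ∀ ch ∈ ((PySem.List.pyGet? data i).getD "").toList,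
      pvDomChar ch = true := by
    intro i ch hch
    cases hg : PySem.List.pyGet? data i with
    | none => simp [hg] at hch
    | some w =>
        exact hdom' w (PySem.List.mem_of_pyGet?_eq_some data hg) ch (by simpa [hg] using hch)
  -- A's accumulator string = flatten of per-word translations, each with trailing ' '
  have hstr :
      (PySem.List.pyRange 0 range_).foldl
        (fun s i =>
          (((PySem.List.pyGet? data i).getD "").toList.foldl
            (fun s c =>
              s ++ (if (32 ≤ c.toNat ∧ c.toNat ≤ 47) ∨ (58 ≤ c.toNat ∧ c.toNat ≤ 64) ∨
                       (91 ≤ c.toNat ∧ c.toNat ≤ 96)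
                    then '%' :: pyHex c.toNat else [c]))
            s) ++ [' '])
        [] =
      (((PySem.List.pyRange 0 range_).map
          (fun i => translateWord ((PySem.List.pyGet? data i).getD "").toList ++ [' ']))).flatten := by
    have hstep :
        (PySem.List.pyRange 0 range_).foldl
          (fun s i =>
            (((PySem.List.pyGet? data i).getD "").toList.foldl
              (fun s c =>
                s ++ (if (32 ≤ c.toNat ∧ c.toNat ≤ 47) ∨ (58 ≤ c.toNat ∧ c.toNat ≤ 64) ∨
                         (91 ≤ c.toNat ∧ c.toNat ≤ 96)
                      then '%' :: pyHex c.toNat else [c]))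
              s) ++ [' '])
          [] =
        (PySem.List.pyRange 0 range_).foldl
          (fun s i =>
            s ++ (translateWord ((PySem.List.pyGet? data i).getD "").toList ++ [' ']))
          [] := by
      apply PySem.List.foldl_congr_mem
      intro s i _
      rw [show ((PySem.List.pyGet? data i).getD "").toList.foldl
            (fun s c =>
              s ++ (if (32 ≤ c.toNat ∧ c.toNat ≤ 47) ∨ (58 ≤ c.toNat ∧ c.toNat ≤ 64) ∨
                       (91 ≤ c.toNat ∧ c.toNat ≤ 96)
                    then '%' :: pyHex c.toNat else [c])) s
          = s ++ translateWord ((PySem.List.pyGet? data i).getD "").toList from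
        by rw [PySem.List.foldl_append_eq_flatMap]; rfl]
      rw [List.append_assoc]
    rw [hstep, PySem.List.foldl_append_eq_flatMap]
    simp [List.flatMap_def]
  -- B's fold = split machine over that same flatten
  have hB :
      (PySem.List.pyRange 0 range_).foldl
        (fun st i =>
          let st := ((PySem.List.pyGet? data i).getD "").toList.foldl
            (fun (st : List (List Char) × List Char) c =>
              match specialTable.get? c with
              | some enc => (st.1, st.2 ++ enc)
              | none =>
                if PySem.Chars.isspace c then
                  if st.2 ≠ [] then (st.1 ++ [st.2], []) else st
                else (st.1, st.2 ++ [c]))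
            st
          if st.2 ≠ [] then (st.1 ++ [st.2], []) else st)
        ([], []) =
      (((PySem.List.pyRange 0 range_).map
          (fun i => translateWord ((PySem.List.pyGet? data i).getD "").toList ++ [' ']))).flatten.foldl
        splitStep ([], []) := by
    rw [List.foldl_flatten, List.foldl_map]
    apply PySem.List.foldl_congr_mem
    intro st i _
    exact bWord_eq ((PySem.List.pyGet? data i).getD "").toList (hwordDom i) st
  rw [hstr, hB, split₀_foldl]
  have hsnd :
      ((((PySem.List.pyRange 0 range_).map
          (fun i => translateWord ((PySem.List.pyGet? data i).getD "").toList ++ [' ']))).flatten.foldl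
        splitStep ([], [])).2 = [] := by
    rw [← hB]
    apply bOuter_snd _ _ _ _ rfl
    intro st i
    exact flush_snd _
  simp [hsnd]
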